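-- pv_equiv track=rewrite | github.com/cyberbotics/webots | projects/languages/ros/controllers/ros_python/kinetic/dist-packages/genpy/generate_struct.py | reduce_pattern
-- ===== SOURCE A (Python) =====
-- def reduce_pattern(pattern):
--     """
--     Optimize the struct format pattern.
--     :param pattern: struct pattern, ``str``
--     :returns: optimized struct pattern, ``str``
--     """
--     if not pattern or len(pattern) == 1 or '%' in pattern:
--         return pattern
--     prev = pattern[0]
--     count = 1
--     new_pattern = ''
--     nums = [str(i) for i in range(0, 9)]
--     for c in pattern[1:]:
--         if c == prev and not c in nums:
--             count += 1
--         else: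
--             if count > 1:
--                 new_pattern = new_pattern + str(count) + prev
--             else:
--                 new_pattern = new_pattern + prev
--             prev = c
--             count = 1
--     if count > 1:
--         new_pattern = new_pattern + str(count) + c
--     else:
--         new_pattern = new_pattern + prev
--     return new_pattern
-- ===== SOURCE B (Python) =====
-- def reduce_pattern(pattern):
--     if not pattern or len(pattern) == 1 or '%' in pattern:
--         return pattern
--     parts = []
--     i = 0
--     n = len(pattern)
--     while i < n:
--         c = pattern[i]
--         j = i + 1
--         while j < n and pattern[j] == c:
--             j += 1
--         run = j - i
--         if c in '012345678':
--             parts.append(c * run)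
--         elif run > 1:
--             parts.append(str(run) + c)
--         else:
--             parts.append(c)
--         i = j
--     return ''.join(parts)
-- ===== Notes on version B (the rewrite author's own statement) =====
-- stated objective: faster
-- what changed: Replaced A's char-by-char prev/count state machine (building the result by repeated string += concatenation) with a run-at-a-time two-pointer scan that measures each run with an inner pointer, emits its piece, and joins the collected pieces once at the end.
import Mathlib
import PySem

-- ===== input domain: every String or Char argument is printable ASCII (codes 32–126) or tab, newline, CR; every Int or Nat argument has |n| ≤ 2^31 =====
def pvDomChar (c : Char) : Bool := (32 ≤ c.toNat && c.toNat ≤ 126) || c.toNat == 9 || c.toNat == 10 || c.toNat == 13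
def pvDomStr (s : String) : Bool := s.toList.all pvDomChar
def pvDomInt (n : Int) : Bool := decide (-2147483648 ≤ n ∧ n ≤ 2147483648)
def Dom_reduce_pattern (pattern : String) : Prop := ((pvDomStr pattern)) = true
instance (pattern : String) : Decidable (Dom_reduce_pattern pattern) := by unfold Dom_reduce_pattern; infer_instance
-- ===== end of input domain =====

-- B replaces A's char-by-char prev/count state machine by a run-at-a-time two-pointer scan
-- collecting pieces joined once at the end instead of repeated string concatenation (objective: faster).

-- ===== PORT A =====
-- nums = [str(i) for i in range(0, 9)]
def pvNums : List Char := ['0', '1', '2', '3', '4', '5', '6', '7', '8']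

-- loop body: state (prev, count, new_pattern, c)
def pvStepA (st : Char × Nat × List Char × Char) (c : Char) : Char × Nat × List Char × Char :=
  match st with
  | (prev, count, newp, _) =>
    if c = prev ∧ ¬ pvNums.contains c then (prev, count + 1, newp, c)
    else (c, 1,
      (if count > 1 then newp ++ (PySem.Int.toStr (count : Int)).toList ++ [prev]
       else newp ++ [prev]), c)

-- the final flush after the loop (uses leftover loop variable c when count > 1, prev otherwise)
def pvFinishA (st : Char × Nat × List Char × Char) : List Char :=
  match st with
  | (prev, count, newp, c) =>
    if count > 1 then newp ++ (PySem.Int.toStr (count : Int)).toList ++ [c]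
    else newp ++ [prev]

def reduce_pattern (pattern : String) : String :=
  let l := pattern.toList
  if l.length = 0 ∨ l.length = 1 ∨ l.contains '%' then pattern
  else
    let prev := l.headD ' '   -- pattern[0]; l is nonempty under the guard
    String.ofList (pvFinishA ((l.drop 1).foldl pvStepA (prev, 1, [], prev)))

-- ===== PORT B =====
-- '012345678'
def pvDigitsB : List Char := "012345678".toList

-- one run's piece: c * run for '0'..'8', else str(run)+c when run > 1, else c
def pvPiece (c : Char) (run : Nat) : List Char :=
  if pvDigitsB.contains c then List.replicate run c
  else if run > 1 then (PySem.Int.toStr (run : Int)).toList ++ [c]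
  else [c]

-- the while loop: scan the current run with a second pointer (takeWhile/dropWhile), emit its
-- piece, continue after the run; pieces are concatenated (''.join fused into the recursion)
def pvEncB : List Char → List Char
  | [] => []
  | c :: rest =>
      pvPiece c (1 + (rest.takeWhile (· = c)).length) ++ pvEncB (rest.dropWhile (· = c))
termination_by l => l.length
decreasing_by
  simp only [List.length_cons]
  exact Nat.lt_succ_of_le (List.length_dropWhile_le _ _)

def reduce_pattern_alt (pattern : String) : String :=
  let l := pattern.toList
  if l.length = 0 ∨ l.length = 1 ∨ l.contains '%' then pattern
  else String.ofList (pvEncB l)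

-- ===== PRECONDITION & SPEC =====
def Spec_reduce_pattern (pattern : String) (out : String) : Prop := out = reduce_pattern_alt pattern
instance (pattern : String) (out : String) : Decidable (Spec_reduce_pattern pattern out) := by unfold Spec_reduce_pattern; infer_instance

-- ===== CLAIM (what is proved, stated in full; the proofs are below) =====
def Claim_equal_reduce_pattern : Prop := ∀ (pattern : String), Dom_reduce_pattern pattern → Spec_reduce_pattern pattern (reduce_pattern pattern)

-- ===== LEMMAS AND PROOFS =====

theorem pvDigitsB_eq_nums : pvDigitsB = pvNums := by decide

theorem pvEncB_nil : pvEncB [] = [] := by simp only [pvEncB]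

theorem pvEncB_cons (c : Char) (rest : List Char) :
    pvEncB (c :: rest) =
      pvPiece c (1 + (rest.takeWhile (· = c)).length) ++ pvEncB (rest.dropWhile (· = c)) := by
  simp only [pvEncB]

-- the flushed piece of a run of `count` copies of `c`
def pvFlushP (count : Nat) (c : Char) : List Char :=
  (if count > 1 then (PySem.Int.toStr (count : Int)).toList else []) ++ [c]

-- recursive restatement of A's loop+flush
def pvEnc2 (prev : Char) (count : Nat) : List Char → List Char
  | [] => pvFlushP count prev
  | c :: rest =>
      if c = prev ∧ ¬ pvNums.contains c then pvEnc2 prev (count + 1) rest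
      else pvFlushP count prev ++ pvEnc2 c 1 rest

theorem pvL1 (l : List Char) : ∀ (prev : Char) (count : Nat) (newp : List Char) (c0 : Char),
    1 ≤ count → (count > 1 → c0 = prev) →
    pvFinishA (l.foldl pvStepA (prev, count, newp, c0)) = newp ++ pvEnc2 prev count l := by
  induction l with
  | nil =>
    intro prev count newp c0 h1 hc
    simp only [List.foldl_nil, pvFinishA, pvEnc2, pvFlushP]
    split_ifs with h
    · rw [hc h, List.append_assoc]
    · simp
  | cons c rest ih =>
    intro prev count newp c0 h1 hc
    simp only [List.foldl_cons, pvStepA]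
    by_cases h : c = prev ∧ ¬ pvNums.contains c
    · rw [if_pos h]
      rw [ih prev (count + 1) newp c (Nat.le_succ_of_le h1) (fun _ => h.1)]
      rw [pvEnc2, if_pos h]
    · rw [if_neg h]
      rw [ih c 1 _ c (le_refl 1) (by omega)]
      rw [pvEnc2, if_neg h]
      unfold pvFlushP
      split_ifs <;> simp

theorem pvSubD (c : Char) (hc : pvNums.contains c = true) : ∀ (rest : List Char),
    List.replicate (rest.takeWhile (· = c)).length c ++ pvEncB (rest.dropWhile (· = c))
      = pvEncB rest := by
  intro rest
  induction rest with
  | nil => simp [pvEncB_nil]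
  | cons d r ih =>
    by_cases hd : d = c
    · subst hd
      simp only [List.takeWhile_cons, List.dropWhile_cons, decide_true, if_true,
        List.length_cons, List.replicate_succ, List.cons_append]
      rw [ih, pvEncB_cons]
      simp only [pvPiece, pvDigitsB_eq_nums, hc, if_true, Nat.one_add, List.replicate_succ, List.cons_append,
        List.cons.injEq, true_and]
      exact ih.symm
    · have hdec : (decide (d = c)) = false := by simp [hd]
      simp [hdec]

theorem pvEncB_cons_digit (c : Char) (rest : List Char) (hc : pvNums.contains c = true) :
    pvEncB (c :: rest) = c :: pvEncB rest := by
  rw [pvEncB_cons]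
  simp only [pvPiece, pvDigitsB_eq_nums, hc, if_pos, Nat.add_comm 1, List.replicate_succ, List.cons_append]
  rw [pvSubD c hc rest]

theorem pvPiece_nondigit (c : Char) (run : Nat) (hc : ¬ pvNums.contains c = true) :
    pvPiece c run = pvFlushP run c := by
  unfold pvPiece pvFlushP
  rw [pvDigitsB_eq_nums, if_neg hc]
  split_ifs <;> simp

theorem pvEncB_cons_nondigit (c : Char) (rest : List Char) (hc : ¬ pvNums.contains c = true) :
    pvEncB (c :: rest) =
      pvFlushP (1 + (rest.takeWhile (· = c)).length) c ++ pvEncB (rest.dropWhile (· = c)) := by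
  rw [pvEncB_cons, pvPiece_nondigit c _ hc]

theorem pvT (l : List Char) : ∀ (prev : Char) (count : Nat),
    1 ≤ count → (pvNums.contains prev = true → count = 1) →
    pvEnc2 prev count l =
      if pvNums.contains prev = true then prev :: pvEncB l
      else pvFlushP (count + (l.takeWhile (· = prev)).length) prev
            ++ pvEncB (l.dropWhile (· = prev)) := by
  induction l with
  | nil =>
    intro prev count h1 hd
    by_cases hp : pvNums.contains prev = true
    · rw [if_pos hp, hd hp]
      simp [pvEnc2, pvFlushP, pvEncB_nil]
    · rw [if_neg hp]
      simp [pvEnc2, pvEncB_nil]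
  | cons c rest ih =>
    intro prev count h1 hd
    by_cases hp : pvNums.contains prev = true
    · have hcond : ¬ (c = prev ∧ ¬ pvNums.contains c = true) := by
        rintro ⟨rfl, hn⟩; exact hn hp
      rw [if_pos hp, pvEnc2, if_neg hcond, hd hp]
      rw [ih c 1 (le_refl 1) (fun _ => rfl)]
      by_cases hc : pvNums.contains c = true
      · rw [if_pos hc, ← pvEncB_cons_digit c rest hc]
        simp [pvFlushP]
      · rw [if_neg hc, ← pvEncB_cons_nondigit c rest hc]
        simp [pvFlushP]
    · by_cases hcp : c = prev
      · subst hcp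
        have hcond : c = c ∧ ¬ pvNums.contains c = true := ⟨rfl, hp⟩
        rw [pvEnc2, if_pos hcond]
        rw [ih c (count + 1) (Nat.le_succ_of_le h1) (fun h => absurd h hp)]
        rw [if_neg hp, if_neg hp]
        simp only [List.takeWhile_cons, List.dropWhile_cons, decide_true, if_true,
          List.length_cons]
        congr 2
        omega
      · have hcond : ¬ (c = prev ∧ ¬ pvNums.contains c = true) := fun h => hcp h.1
        have hdec : (decide (c = prev)) = false := by simp [hcp]
        rw [pvEnc2, if_neg hcond, if_neg hp]
        rw [ih c 1 (le_refl 1) (fun _ => rfl)]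
        simp only [List.takeWhile_cons, List.dropWhile_cons, hdec, Bool.false_eq_true,
          if_false, List.length_nil, Nat.add_zero]
        by_cases hc : pvNums.contains c = true
        · rw [if_pos hc, ← pvEncB_cons_digit c rest hc]
        · rw [if_neg hc, ← pvEncB_cons_nondigit c rest hc]

theorem pvEnc2_eq_encB (prev : Char) (l : List Char) :
    pvEnc2 prev 1 l = pvEncB (prev :: l) := by
  rw [pvT l prev 1 (le_refl 1) (fun _ => rfl)]
  by_cases hp : pvNums.contains prev = true
  · rw [if_pos hp, pvEncB_cons_digit prev l hp]
  · rw [if_neg hp, pvEncB_cons_nondigit prev l hp]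

-- ===== VERDICT (by name: the statement is the Claim_ definition above) =====
theorem reduce_pattern_spec : Claim_equal_reduce_pattern := by
  intro pattern _
  unfold Spec_reduce_pattern reduce_pattern reduce_pattern_alt
  simp only []
  split_ifs with hg
  · rfl
  · cases h : pattern.toList with
    | nil => rw [h] at hg; simp at hg
    | cons p rest =>
      simp only [List.headD_cons, List.drop_succ_cons, List.drop_zero]
      rw [pvL1 rest p 1 [] p (le_refl 1) (by omega)]
      rw [pvEnc2_eq_encB p rest]
      simp
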